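-- pv_equiv track=rewrite | github.com/EnzoMH/PythonLearning_Base | 프로그래머스/0/181918. 배열 만들기 4/배열 만들기 4.py | solution
-- ===== SOURCE A (Python) =====
-- def solution(arr):
--     stk = []  # 스택 초기화
--     i = 0  # 인덱스 초기화
--
--     while i < len(arr):
--         if not stk:  # stk가 빈 배열인 경우
--             stk.append(arr[i])
--             i += 1
--         elif stk[-1] < arr[i]:  # stk의 마지막 원소가 arr[i]보다 작은 경우
--             stk.append(arr[i])
--             i += 1
--         else:  # stk의 마지막 원소가 arr[i]보다 크거나 같은 경우
--             stk.pop()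
--     return stk
-- ===== SOURCE B (Python) =====
-- def solution(arr):
--     # right-to-left suffix-minimum scan: an element survives iff it is strictly
--     # smaller than every element after it; no stack, no popping
--     res = []
--     m = None  # minimum of the elements already seen (the suffix to the right)
--     for x in reversed(arr):
--         if m is None or x < m:
--             res.append(x)
--             m = x
--     res.reverse()
--     return res
-- ===== Notes on version B (the rewrite author's own statement) =====
-- stated objective: faster
-- what changed: Replaces the push/pop increasing stack with a right-to-left suffix-minimum scan that keeps an element iff it is strictly smaller than the running minimum of the elements after it.
import Mathlib
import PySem

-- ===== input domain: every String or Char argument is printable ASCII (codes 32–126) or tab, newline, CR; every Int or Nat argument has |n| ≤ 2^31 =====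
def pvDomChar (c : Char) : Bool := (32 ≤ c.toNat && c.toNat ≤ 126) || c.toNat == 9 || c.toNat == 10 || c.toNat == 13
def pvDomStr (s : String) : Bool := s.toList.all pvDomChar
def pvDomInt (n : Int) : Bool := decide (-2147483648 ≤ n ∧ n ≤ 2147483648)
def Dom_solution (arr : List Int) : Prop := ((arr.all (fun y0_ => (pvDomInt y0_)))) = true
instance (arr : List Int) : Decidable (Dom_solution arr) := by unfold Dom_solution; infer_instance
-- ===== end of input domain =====

-- B replaces A's push/pop increasing stack with a right-to-left suffix-minimum scan
-- (keep an element iff it is strictly below the minimum of the elements after it).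

-- ===== PORT A =====
-- A's while-loop; the stack is kept top-at-head (Python's stk[-1]/append/pop act at
-- the end, here at the head), so the returned value is stk.reverse (Python order).
def solGo (arr : List Int) (stk : List Int) (i : Nat) : List Int :=
  if h : i < arr.length then
    match stk with
    | [] => solGo arr [arr[i]] (i + 1)
    | t :: s =>
      if t < arr[i] then solGo arr (arr[i] :: t :: s) (i + 1)
      else solGo arr s i
  else stk.reverse
termination_by 2 * (arr.length - i) + stk.length
decreasing_by all_goals (simp only [List.length_cons, List.length_nil]; omega)

def solution (arr : List Int) : List Int := solGo arr [] 0

-- ===== PORT B =====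
-- Source B's loop over reversed(arr): m = running suffix minimum (None initially),
-- res collects survivors (appended at the end), reversed on return.
def condB (x : Int) (m : Option Int) : Bool :=
  match m with
  | none => true
  | some v => decide (x < v)

def altGo : List Int → Option Int → List Int → List Int
  | [], _, res => res
  | x :: rest, m, res =>
    if condB x m then altGo rest (some x) (res ++ [x])
    else altGo rest m res

def solution_alt (arr : List Int) : List Int := (altGo arr.reverse none []).reverse

-- ===== PRECONDITION & SPEC =====
def Spec_solution (arr : List Int) (out : List Int) : Prop := out = solution_alt arr
instance (arr : List Int) (out : List Int) : Decidable (Spec_solution arr out) := by unfold Spec_solution; infer_instance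

-- ===== CLAIM (what is proved, stated in full; the proofs are below) =====
def Claim_equal_solution : Prop := ∀ (arr : List Int), Dom_solution arr → Spec_solution arr (solution arr)

-- ===== LEMMAS AND PROOFS =====

-- the common characterisation: keep x iff x is strictly below everything in (rest ++ s)
def fkeep : List Int → List Int → List Int
  | [], _ => []
  | x :: xs, s => if (xs ++ s).all (fun y => decide (x < y)) then x :: fkeep xs s else fkeep xs s

-- A's loop, one input element at a time: pop while top ≥ x, then push x
def pstep : List Int → List Int → List Int
  | stk, [] => stk
  | stk, x :: rest => pstep (x :: stk.dropWhile (fun t => decide (x ≤ t))) rest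

-- B's loop without the accumulator
def gfun : List Int → Option Int → List Int
  | [], _ => []
  | x :: rest, m => if condB x m then x :: gfun rest (some x) else gfun rest m

lemma altGo_eq_gfun (l : List Int) : ∀ m res, altGo l m res = res ++ gfun l m := by
  induction l with
  | nil => intro m res; simp [altGo, gfun]
  | cons x rest ih =>
    intro m res
    by_cases h : condB x m
    · simp [altGo, gfun, h, ih]
    · simp [altGo, gfun, h, ih]

lemma solGo_eq_pstep (arr stk : List Int) (i : Nat) :
    solGo arr stk i = (pstep stk (arr.drop i)).reverse := by
  induction stk, i using solGo.induct arr with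
  | case1 i h ih =>
    rw [solGo, List.drop_eq_getElem_cons h]
    simp [h, ih, pstep, List.dropWhile]
  | case2 i h t s hlt ih =>
    rw [solGo, List.drop_eq_getElem_cons h]
    simp only [h, dif_pos, hlt, if_pos, ih, pstep, List.dropWhile]
    have : ¬ (arr[i] ≤ t) := by omega
    simp [this]
  | case3 i h t s hge ih =>
    rw [solGo]
    have hd := List.drop_eq_getElem_cons h
    simp only [h, dif_pos, hge, ih, hd, pstep, List.dropWhile]
    have : arr[i] ≤ t := by omega
    simp [this]
  | case4 stk i h =>
    rw [solGo]
    have : arr.drop i = [] := List.drop_eq_nil_of_le (by omega)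
    simp [h, this, pstep]

lemma mem_dropWhile_lt (x : Int) :
    ∀ stk : List Int, stk.Pairwise (fun a b => b < a) →
      ∀ t ∈ stk.dropWhile (fun u => decide (x ≤ u)), t < x := by
  intro stk
  induction stk with
  | nil => intro _ t ht; simp [List.dropWhile] at ht
  | cons h s ih =>
    intro hp t ht
    by_cases hx : x ≤ h
    · simp [List.dropWhile, hx] at ht
      exact ih hp.tail t (by simpa [List.dropWhile] using ht)
    · simp [List.dropWhile, hx] at ht
      rcases ht with rfl | ht
      · omega
      · have := (List.pairwise_cons.mp hp).1 t ht
        omega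

lemma pstep_eq (l : List Int) : ∀ stk : List Int, stk.Pairwise (fun a b => b < a) →
    pstep stk l = (fkeep l []).reverse ++ stk.filter (fun t => l.all (fun y => decide (t < y))) := by
  induction l with
  | nil =>
    intro stk _
    simp [pstep, fkeep]
  | cons x rest ih =>
    intro stk hp
    have hsub : (stk.dropWhile (fun u => decide (x ≤ u))).Sublist stk := List.dropWhile_sublist _
    have hp' : (stk.dropWhile (fun u => decide (x ≤ u))).Pairwise (fun a b => b < a) :=
      hp.sublist hsub
    have hlt : ∀ t ∈ stk.dropWhile (fun u => decide (x ≤ u)), t < x := mem_dropWhile_lt x stk hp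
    have hp2 : (x :: stk.dropWhile (fun u => decide (x ≤ u))).Pairwise (fun a b => b < a) :=
      List.pairwise_cons.mpr ⟨hlt, hp'⟩
    have hfil : stk.filter (fun t => (x :: rest).all (fun y => decide (t < y)))
        = (stk.dropWhile (fun u => decide (x ≤ u))).filter (fun t => rest.all (fun y => decide (t < y))) := by
      conv_lhs => rw [← List.takeWhile_append_dropWhile (p := fun u => decide (x ≤ u)) (l := stk)]
      rw [List.filter_append]
      have h1 : (stk.takeWhile (fun u => decide (x ≤ u))).filter
          (fun t => (x :: rest).all (fun y => decide (t < y))) = [] := by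
        rw [List.filter_eq_nil_iff]
        intro t ht
        have := List.mem_takeWhile_imp ht
        simp at this ⊢
        intro h; omega
      rw [h1, List.nil_append]
      apply List.filter_congr
      intro t ht
      have := hlt t ht
      simp [this]
    rw [pstep, ih _ hp2, hfil]
    by_cases hx : rest.all (fun y => decide (x < y))
    · have hx' : ((rest ++ []).all fun y => decide (x < y)) = true := by simpa using hx
      simp only [fkeep, hx', if_pos, List.filter_cons, hx]
      simp
    · have hx' : ¬ ((rest ++ []).all fun y => decide (x < y)) = true := by simpa using hx
      simp only [fkeep, hx', List.filter_cons]
      simp [hx]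

lemma fkeep_append_singleton (a : Int) : ∀ (as s : List Int),
    fkeep (as ++ [a]) s = fkeep as (a :: s) ++ fkeep [a] s := by
  intro as
  induction as with
  | nil => intro s; simp [fkeep]
  | cons x as ih =>
    intro s
    have hcond : (((as ++ [a]) ++ s).all fun y => decide (x < y))
        = ((as ++ (a :: s)).all fun y => decide (x < y)) := by
      simp [List.all_append]
    rw [List.cons_append]
    simp only [fkeep, hcond, ih]
    split_ifs with h <;> simp

lemma gfun_rev (l : List Int) : ∀ (m : Option Int) (s : List Int),
    (∀ x : Int, condB x m = true ↔ ∀ y ∈ s, x < y) →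
    (gfun l.reverse m).reverse = fkeep l s := by
  induction l using List.reverseRecOn with
  | nil => intro m s _; simp [gfun, fkeep]
  | append_singleton as a ih =>
    intro m s hm
    rw [List.reverse_append, List.reverse_singleton, List.singleton_append, gfun,
      fkeep_append_singleton]
    by_cases hc : condB a m
    · have hall : ∀ y ∈ s, a < y := (hm a).mp hc
      have hs : (s.all fun y => decide (a < y)) = true := by
        simp only [List.all_eq_true, decide_eq_true_eq]; exact hall
      have hk : fkeep [a] s = [a] := by simp [fkeep, hs]
      rw [hc, if_pos rfl, List.reverse_cons, hk]
      congr 1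
      apply ih
      intro x
      constructor
      · intro hx y hy
        rcases List.mem_cons.mp hy with rfl | hy
        · simpa [condB] using hx
        · have := hall y hy
          have hxa : x < a := by simpa [condB] using hx
          omega
      · intro hx
        simp only [condB, decide_eq_true_eq]
        exact hx a (by simp)
    · have hnall : ¬ ∀ y ∈ s, a < y := fun h => hc ((hm a).mpr h)
      have hs : (s.all fun y => decide (a < y)) = false := by
        simp only [List.all_eq_false]
        push Not at hnall
        rcases hnall with ⟨y0, hy0, hy0'⟩
        exact ⟨y0, hy0, by simpa using hy0'⟩
      have hk : fkeep [a] s = [] := by simp [fkeep, hs]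
      rw [if_neg hc, hk, List.append_nil]
      apply ih
      intro x
      rw [hm x]
      constructor
      · intro hx y hy
        rcases List.mem_cons.mp hy with rfl | hy
        · push Not at hnall
          rcases hnall with ⟨y0, hy0, hy0'⟩
          have := hx y0 hy0
          omega
        · exact hx y hy
      · intro hx y hy
        exact hx y (by simp [hy])

lemma solution_eq_fkeep (arr : List Int) : solution arr = fkeep arr [] := by
  rw [solution, solGo_eq_pstep, List.drop_zero, pstep_eq arr [] (by simp)]
  simp

lemma solution_alt_eq_fkeep (arr : List Int) : solution_alt arr = fkeep arr [] := by
  rw [solution_alt, altGo_eq_gfun, List.nil_append]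
  exact gfun_rev arr none [] (by intro x; simp [condB])

-- ===== VERDICT (by name: the statement is the Claim_ definition above) =====
theorem solution_spec : Claim_equal_solution := by
  intro arr _
  unfold Spec_solution
  rw [solution_eq_fkeep, solution_alt_eq_fkeep]
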